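-- pv_equiv track=rewrite | github.com/MinBZK/poc-machine-law | script/migrate_source_mappings.py | splice_existing_source
-- ===== SOURCE A (Python) =====
-- def splice_existing_source(
--     text: str,
--     source_line: int,
--     source_col: int,
--     rendered_source: str,
-- ) -> str:
--     """Replace the source: {...} block at (source_line, source_col) with rendered_source.
--
--     rendered_source is a string starting with `<indent>source:\\n` where indent
--     matches source_col. Determines the existing block's extent by finding lines
--     that are indented strictly deeper than source_col, plus the source: line
--     itself (whether inline like `source: {}` or multi-line).
--     """
--     lines = text.splitlines(keepends=True)
--     n = len(lines)
--
--     block_start = source_line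
--     src_line_text = lines[source_line].rstrip("\n")
--     src_value = src_line_text[source_col + len("source:") :].strip()
--
--     if src_value:
--         # Inline form like "source: {}" — only that one line is the block
--         block_end = source_line + 1
--     else:
--         # Multi-line form: include all subsequent lines indented > source_col
--         j = source_line + 1
--         deeper_prefix = " " * (source_col + 1)
--         while j < n:
--             line = lines[j]
--             if not line.strip():
--                 # Blank line: peek ahead
--                 k = j + 1
--                 while k < n and not lines[k].strip():
--                     k += 1
--                 if k < n and lines[k].startswith(deeper_prefix):
--                     j = k + 1
--                     continue
--                 break
--             if line.startswith(deeper_prefix):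
--                 j += 1
--             else:
--                 break
--         block_end = j
--
--     new_lines = lines[:block_start] + [rendered_source] + lines[block_end:]
--     return "".join(new_lines)
-- ===== SOURCE B (Python) =====
-- def splice_existing_source(
--     text: str,
--     source_line: int,
--     source_col: int,
--     rendered_source: str,
-- ) -> str:
--     """Replace the source: block at (source_line, source_col) with rendered_source.
--
--     Finds the block's end by scanning forward to the first line that is neither
--     blank nor indented deeper than source_col, then trimming trailing blank
--     lines back off (never past the source: line itself).
--     """
--     lines = text.splitlines(keepends=True)
--     n = len(lines)
--
--     src_value = lines[source_line].rstrip("\n")[source_col + len("source:"):].strip()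
--
--     if src_value:
--         # Inline form like "source: {}" — only that one line is the block
--         block_end = source_line + 1
--     else:
--         deeper_prefix = " " * (source_col + 1)
--         # Forward scan: first line that is neither blank nor deeper-indented
--         t = source_line + 1
--         while t < n and (not lines[t].strip() or lines[t].startswith(deeper_prefix)):
--             t += 1
--         # Trim trailing blank lines off the block (they separate, not belong)
--         while t > source_line + 1 and not lines[t - 1].strip():
--             t -= 1
--         block_end = t
--
--     return "".join(lines[:source_line] + [rendered_source] + lines[block_end:])
-- ===== Notes on version B (the rewrite author's own statement) =====
-- stated objective: simpler
-- what changed: A's single forward scan with a nested blank-run peek-ahead loop (and a 'continue' jump past the peeked line) is replaced by two flat loops: scan forward to the first line that is neither blank nor deeper-indented, then trim trailing blank lines back off; no nested loop and no jump.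
import Mathlib
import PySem

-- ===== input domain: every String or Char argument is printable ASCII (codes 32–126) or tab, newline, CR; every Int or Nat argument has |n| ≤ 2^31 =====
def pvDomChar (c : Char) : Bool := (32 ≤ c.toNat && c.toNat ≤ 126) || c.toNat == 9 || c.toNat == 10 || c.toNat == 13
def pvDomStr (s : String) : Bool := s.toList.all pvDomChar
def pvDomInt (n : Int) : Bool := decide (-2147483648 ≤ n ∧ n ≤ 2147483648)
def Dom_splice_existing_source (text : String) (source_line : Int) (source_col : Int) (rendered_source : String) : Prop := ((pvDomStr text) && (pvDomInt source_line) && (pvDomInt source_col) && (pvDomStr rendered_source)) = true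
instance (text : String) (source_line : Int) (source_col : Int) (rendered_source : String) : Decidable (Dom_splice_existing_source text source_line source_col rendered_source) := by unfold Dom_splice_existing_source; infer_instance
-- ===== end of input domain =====

-- B replaces A's nested blank-run peek-ahead loop by a flat forward scan plus a backward
-- trim of trailing blank lines (objective: simpler); return values are proved equal.

-- ----- shared library-call helpers (both Pythons call the same built-ins) -----

-- s.splitlines(keepends=True): exact on Dom (the only line boundaries Dom admits are \n, \r, \r\n)
def pySplitlinesKeepGo (cur : List Char) : List Char → List (List Char)
  | [] => if cur.isEmpty then [] else [cur.reverse]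
  | '\r' :: '\n' :: rest => (cur.reverse ++ ['\r', '\n']) :: pySplitlinesKeepGo [] rest
  | '\r' :: rest => (cur.reverse ++ ['\r']) :: pySplitlinesKeepGo [] rest
  | '\n' :: rest => (cur.reverse ++ ['\n']) :: pySplitlinesKeepGo [] rest
  | c :: rest => pySplitlinesKeepGo (c :: cur) rest

def pySplitlinesKeep (cs : List Char) : List (List Char) := pySplitlinesKeepGo [] cs

-- s.rstrip("\n"): drop trailing '\n' characters (exact)
def rstripNl (l : List Char) : List Char := (l.reverse.dropWhile (fun c => c == '\n')).reverse

-- termination measures (cited by the loops' decreasing_by; kept tiny so definition families stay small)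
theorem pvDecStep (n k : Int) (h : k < n) : (n - (k + 1)).toNat < (n - k).toNat := by omega
theorem pvDecJump (n j p : Int) (h1 : j + 1 ≤ p) (h2 : p < n) : (n - (p + 1)).toNat < (n - j).toNat := by omega
theorem pvDecDown (lb t : Int) (h : lb < t) : (t - 1 - lb).toNat < (t - lb).toNat := by omega

-- ===== PORT A =====

-- inner peek-ahead loop: while k < n and not lines[k].strip(): k += 1
def peekA (lines : List (List Char)) (n k : Int) : Int :=
  if k < n then
    if PySem.Chars.strip ((PySem.List.pyGet? lines k).getD []) = [] then
      peekA lines n (k + 1)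
    else k
  else k
  termination_by (n - k).toNat
  decreasing_by rename_i h1 _; exact pvDecStep n k h1

-- cited by whileA's decreasing_by
theorem peekA_ge (lines : List (List Char)) (n k : Int) : k ≤ peekA lines n k := by
  rw [peekA]
  split
  · split
    · have := peekA_ge lines n (k + 1); omega
    · omega
  · omega
  termination_by (n - k).toNat
  decreasing_by rename_i h1 _; exact pvDecStep n k h1

-- A's outer while-loop over j, with the blank-line peek-ahead and the 'continue' jump past the
-- peeked deeper line (the local variables line and k are inlined; peekA is pure)
def whileA (lines : List (List Char)) (dp : List Char) (n j : Int) : Int :=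
  if j < n then
    if PySem.Chars.strip ((PySem.List.pyGet? lines j).getD []) = [] then
      if peekA lines n (j + 1) < n ∧
          PySem.Chars.startswith ((PySem.List.pyGet? lines (peekA lines n (j + 1))).getD []) dp = true then
        whileA lines dp n (peekA lines n (j + 1) + 1)
      else j
    else
      if PySem.Chars.startswith ((PySem.List.pyGet? lines j).getD []) dp = true then
        whileA lines dp n (j + 1)
      else j
  else j
  termination_by (n - j).toNat
  decreasing_by
  · rename_i hjn _hbl hcond
    exact pvDecJump n j (peekA lines n (j + 1)) (peekA_ge lines n (j + 1)) hcond.1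
  · rename_i hjn _hbl _hsw
    exact pvDecStep n j hjn

def splice_existing_source (text : String) (source_line : Int) (source_col : Int) (rendered_source : String) : String :=
  let lines := pySplitlinesKeep text.toList
  let n : Int := lines.length
  match PySem.List.pyGet? lines source_line with
  | none => ""   -- lines[source_line] raises IndexError; excluded by Pre_
  | some l0 =>
    let src_line_text := rstripNl l0
    let src_value := PySem.Chars.strip (PySem.List.slice src_line_text (some (source_col + 7)) none)
    let block_start := source_line
    let block_end : Int :=
      if src_value ≠ [] then source_line + 1
      else whileA lines (PySem.List.pyRepeat [' '] (source_col + 1)) n (source_line + 1)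
    String.ofList (PySem.Chars.join []
      (PySem.List.slice lines none (some block_start) ++ [rendered_source.toList]
        ++ PySem.List.slice lines (some block_end) none))

-- ===== PORT B =====

-- forward scan: while t < n and (not lines[t].strip() or lines[t].startswith(deeper_prefix)): t += 1
def bStop (lines : List (List Char)) (dp : List Char) (n t : Int) : Int :=
  if t < n then
    if PySem.Chars.strip ((PySem.List.pyGet? lines t).getD []) = [] ∨
        PySem.Chars.startswith ((PySem.List.pyGet? lines t).getD []) dp = true then
      bStop lines dp n (t + 1)
    else t
  else t
  termination_by (n - t).toNat
  decreasing_by rename_i h1 _; exact pvDecStep n t h1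

-- backward trim: while t > lb and not lines[t-1].strip(): t -= 1
def bTrim (lines : List (List Char)) (lb t : Int) : Int :=
  if lb < t ∧ PySem.Chars.strip ((PySem.List.pyGet? lines (t - 1)).getD []) = [] then
    bTrim lines lb (t - 1)
  else t
  termination_by (t - lb).toNat
  decreasing_by rename_i h1; exact pvDecDown lb t h1.1

def splice_existing_source_alt (text : String) (source_line : Int) (source_col : Int) (rendered_source : String) : String :=
  let lines := pySplitlinesKeep text.toList
  match PySem.List.pyGet? lines source_line with
  | none => ""   -- lines[source_line] raises IndexError; excluded by Pre_
  | some l0 =>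
    let src_value := PySem.Chars.strip (PySem.List.slice (rstripNl l0) (some (source_col + 7)) none)
    let block_end : Int :=
      if src_value ≠ [] then source_line + 1
      else
        bTrim lines (source_line + 1)
          (bStop lines (PySem.List.pyRepeat [' '] (source_col + 1)) lines.length (source_line + 1))
    String.ofList (PySem.Chars.join []
      (PySem.List.slice lines none (some source_line) ++ [rendered_source.toList]
        ++ PySem.List.slice lines (some block_end) none))

-- ===== PRECONDITION & SPEC =====

-- number of lines of text.splitlines(keepends=True), stated positionally (closed form):
-- a line ends at i iff cs[i] = '\n', or cs[i] = '\r' not followed by '\n'; plus one unterminated tail line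
def pyLineCount (cs : List Char) : Nat :=
  (List.range cs.length).countP
    (fun i => decide (cs[i]? = some '\n' ∨ (cs[i]? = some '\r' ∧ cs[i + 1]? ≠ some '\n')))
  + (match cs.getLast? with
     | none => 0
     | some c => if c = '\n' ∨ c = '\r' then 0 else 1)

-- Pre_ excludes exactly the inputs where lines[source_line] raises IndexError (index out of range)
def Pre_splice_existing_source (text : String) (source_line : Int) (source_col : Int) (rendered_source : String) : Prop :=
  PySem.Raise.InRange (pyLineCount text.toList) source_line

instance (text : String) (source_line : Int) (source_col : Int) (rendered_source : String) : Decidable (Pre_splice_existing_source text source_line source_col rendered_source) := by unfold Pre_splice_existing_source; infer_instance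

def pvWitness_splice_existing_source : String × Int × Int × String :=
  ("source:\n  x: 1\nnext: 2\n", 0, 0, "source:\n  y: 2\n")

def Spec_splice_existing_source (text : String) (source_line : Int) (source_col : Int) (rendered_source : String) (out : String) : Prop := out = splice_existing_source_alt text source_line source_col rendered_source
instance (text : String) (source_line : Int) (source_col : Int) (rendered_source : String) (out : String) : Decidable (Spec_splice_existing_source text source_line source_col rendered_source out) := by unfold Spec_splice_existing_source; infer_instance

-- ===== CLAIM (what is proved, stated in full; the proofs are below) =====
def Claim_equal_splice_existing_source : Prop := ∀ (text : String) (source_line : Int) (source_col : Int) (rendered_source : String), Dom_splice_existing_source text source_line source_col rendered_source → Pre_splice_existing_source text source_line source_col rendered_source → Spec_splice_existing_source text source_line source_col rendered_source (splice_existing_source text source_line source_col rendered_source)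

-- ===== LEMMAS AND PROOFS =====

theorem peekA_le (lines : List (List Char)) (n k : Int) (h : k ≤ n) : peekA lines n k ≤ n := by
  rw [peekA]
  split
  · split
    · exact peekA_le lines n (k + 1) (by omega)
    · omega
  · omega
  termination_by (n - k).toNat
  decreasing_by rename_i h1 _; exact pvDecStep n k h1

theorem peekA_blank (lines : List (List Char)) (n k : Int) :
    ∀ i, k ≤ i → i < peekA lines n k →
      PySem.Chars.strip ((PySem.List.pyGet? lines i).getD []) = [] := by
  intro i hki hilt
  by_cases h1 : k < n
  · by_cases h2 : PySem.Chars.strip ((PySem.List.pyGet? lines k).getD []) = []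
    · have he : peekA lines n k = peekA lines n (k + 1) := by
        rw [peekA]; rw [if_pos h1, if_pos h2]
      rw [he] at hilt
      rcases eq_or_lt_of_le hki with rfl | h
      · exact h2
      · exact peekA_blank lines n (k + 1) i (by omega) hilt
    · have he : peekA lines n k = k := by rw [peekA]; rw [if_pos h1, if_neg h2]
      rw [he] at hilt; omega
  · have he : peekA lines n k = k := by rw [peekA]; rw [if_neg h1]
    rw [he] at hilt; omega
  termination_by (n - k).toNat
  decreasing_by exact pvDecStep n k h1

theorem peekA_stop (lines : List (List Char)) (n k : Int) (h : peekA lines n k < n) :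
    ¬ PySem.Chars.strip ((PySem.List.pyGet? lines (peekA lines n k)).getD []) = [] := by
  by_cases h1 : k < n
  · by_cases h2 : PySem.Chars.strip ((PySem.List.pyGet? lines k).getD []) = []
    · have he : peekA lines n k = peekA lines n (k + 1) := by
        rw [peekA]; rw [if_pos h1, if_pos h2]
      rw [he] at h ⊢
      exact peekA_stop lines n (k + 1) h
    · have he : peekA lines n k = k := by rw [peekA]; rw [if_pos h1, if_neg h2]
      rw [he]; exact h2
  · have he : peekA lines n k = k := by rw [peekA]; rw [if_neg h1]
    rw [he] at h; omega
  termination_by (n - k).toNat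
  decreasing_by exact pvDecStep n k h1

theorem bStop_ge (lines : List (List Char)) (dp : List Char) (n t : Int) : t ≤ bStop lines dp n t := by
  rw [bStop]
  split
  · split
    · have := bStop_ge lines dp n (t + 1); omega
    · omega
  · omega
  termination_by (n - t).toNat
  decreasing_by rename_i h1 _; exact pvDecStep n t h1

-- stepping bStop's start over lines that all satisfy the loop condition does not change it
theorem bStop_congr (lines : List (List Char)) (dp : List Char) (n j m : Int)
    (hjm : j ≤ m) (hmn : m ≤ n)
    (hall : ∀ i, j ≤ i → i < m →
      (PySem.Chars.strip ((PySem.List.pyGet? lines i).getD []) = [] ∨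
       PySem.Chars.startswith ((PySem.List.pyGet? lines i).getD []) dp = true)) :
    bStop lines dp n j = bStop lines dp n m := by
  rcases eq_or_lt_of_le hjm with rfl | hlt
  · rfl
  · have he : bStop lines dp n j = bStop lines dp n (j + 1) := by
      rw [bStop]; rw [if_pos (by omega : j < n), if_pos (hall j le_rfl hlt)]
    rw [he]
    exact bStop_congr lines dp n (j + 1) m (by omega) hmn (fun i h1 h2 => hall i (by omega) h2)
  termination_by (m - j).toNat
  decreasing_by exact pvDecStep m j hlt

-- trimming over all-blank lines goes all the way down to the lower bound
theorem bTrim_all_blank (lines : List (List Char)) (lb t : Int) (hle : lb ≤ t)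
    (hall : ∀ i, lb ≤ i → i < t → PySem.Chars.strip ((PySem.List.pyGet? lines i).getD []) = []) :
    bTrim lines lb t = lb := by
  rcases eq_or_lt_of_le hle with rfl | hlt
  · rw [bTrim]; rw [if_neg (by omega)]
  · have he : bTrim lines lb t = bTrim lines lb (t - 1) := by
      rw [bTrim]; rw [if_pos ⟨hlt, hall (t - 1) (by omega) (by omega)⟩]
    rw [he]
    exact bTrim_all_blank lines lb (t - 1) (by omega) (fun i h1 h2 => hall i h1 (by omega))
  termination_by (t - lb).toNat
  decreasing_by exact pvDecDown lb t hlt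

-- the lower bound of bTrim is irrelevant below a non-blank line
theorem bTrim_lb_irrel (lines : List (List Char)) (lb lb' t : Int)
    (h1 : lb ≤ lb') (h2 : lb' ≤ t)
    (h3 : lb' = lb ∨ ¬ PySem.Chars.strip ((PySem.List.pyGet? lines (lb' - 1)).getD []) = []) :
    bTrim lines lb t = bTrim lines lb' t := by
  by_cases hb : lb' < t ∧ PySem.Chars.strip ((PySem.List.pyGet? lines (t - 1)).getD []) = []
  · have heL : bTrim lines lb t = bTrim lines lb (t - 1) := by
      rw [bTrim]; rw [if_pos ⟨by omega, hb.2⟩]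
    have heR : bTrim lines lb' t = bTrim lines lb' (t - 1) := by
      rw [bTrim]; rw [if_pos ⟨hb.1, hb.2⟩]
    rw [heL, heR]
    exact bTrim_lb_irrel lines lb lb' (t - 1) h1 (by omega) h3
  · have heR : bTrim lines lb' t = t := by
      rw [bTrim]; rw [if_neg hb]
    rcases eq_or_lt_of_le h2 with rfl | hlt
    · rcases h3 with rfl | hnb
      · rfl
      · have heL : bTrim lines lb lb' = lb' := by
          rw [bTrim]
          rw [if_neg (by rintro ⟨_, hc⟩; exact hnb hc)]
        rw [heL, heR]
    · have hnb : ¬ PySem.Chars.strip ((PySem.List.pyGet? lines (t - 1)).getD []) = [] := by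
        intro hc; exact hb ⟨hlt, hc⟩
      have heL : bTrim lines lb t = t := by
        rw [bTrim]; rw [if_neg (by rintro ⟨_, hc⟩; exact hnb hc)]
      rw [heL, heR]
  termination_by (t - lb').toNat
  decreasing_by exact pvDecDown lb' t hb.1

-- the heart of the proof: A's peek-ahead loop equals B's forward scan followed by the backward trim
theorem whileA_eq (lines : List (List Char)) (dp : List Char) (n j : Int) :
    whileA lines dp n j = bTrim lines j (bStop lines dp n j) := by
  by_cases hjn : j < n
  · by_cases hP : PySem.Chars.strip ((PySem.List.pyGet? lines j).getD []) = []
    · -- blank line at j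
      obtain ⟨k, hk⟩ : ∃ k, peekA lines n (j + 1) = k := ⟨_, rfl⟩
      have hk1 : j + 1 ≤ k := hk ▸ peekA_ge lines n (j + 1)
      have hkn : k ≤ n := hk ▸ peekA_le lines n (j + 1) (by omega)
      have hblanks : ∀ i, j ≤ i → i < k →
          PySem.Chars.strip ((PySem.List.pyGet? lines i).getD []) = [] := by
        intro i hi1 hi2
        rcases eq_or_lt_of_le hi1 with rfl | h
        · exact hP
        · exact peekA_blank lines n (j + 1) i (by omega) (hk ▸ hi2)
      by_cases h2 : k < n ∧ PySem.Chars.startswith ((PySem.List.pyGet? lines k).getD []) dp = true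
      · -- peeked line is deeper: A jumps past it
        have hknb : ¬ PySem.Chars.strip ((PySem.List.pyGet? lines k).getD []) = [] :=
          hk ▸ peekA_stop lines n (j + 1) (by rw [hk]; exact h2.1)
        have hA : whileA lines dp n j = whileA lines dp n (k + 1) := by
          rw [whileA]; rw [if_pos hjn, if_pos hP, hk, if_pos h2]
        rw [hA, whileA_eq lines dp n (k + 1)]
        have hS : bStop lines dp n j = bStop lines dp n (k + 1) := by
          apply bStop_congr lines dp n j (k + 1) (by omega) (by omega)
          intro i hi1 hi2
          rcases eq_or_lt_of_le (by omega : i ≤ k) with rfl | h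
          · exact Or.inr h2.2
          · exact Or.inl (hblanks i hi1 h)
        rw [← hS]
        refine (bTrim_lb_irrel lines j (k + 1) (bStop lines dp n j) (by omega)
          (hS ▸ bStop_ge lines dp n (k + 1)) (Or.inr ?_)).symm
        simpa using hknb
      · -- peeked line not deeper (or no line left): A stops at j
        have hA : whileA lines dp n j = j := by
          rw [whileA]; rw [if_pos hjn, if_pos hP, hk, if_neg h2]
        rw [hA]
        have hS : bStop lines dp n j = k := by
          rw [bStop_congr lines dp n j k (by omega) hkn
            (fun i hi1 hi2 => Or.inl (hblanks i hi1 hi2))]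
          rcases eq_or_lt_of_le hkn with rfl | hlt
          · rw [bStop]; rw [if_neg (by omega)]
          · have hknb : ¬ PySem.Chars.strip ((PySem.List.pyGet? lines k).getD []) = [] :=
              hk ▸ peekA_stop lines n (j + 1) (by rw [hk]; exact hlt)
            have hnd : ¬ PySem.Chars.startswith ((PySem.List.pyGet? lines k).getD []) dp = true := by
              intro hd; exact h2 ⟨hlt, hd⟩
            rw [bStop]
            rw [if_pos hlt, if_neg (by rintro (h | h); exacts [hknb h, hnd h])]
        rw [hS]
        exact (bTrim_all_blank lines j k (by omega) hblanks).symm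
    · by_cases hD : PySem.Chars.startswith ((PySem.List.pyGet? lines j).getD []) dp = true
      · -- deeper-indented line: both advance
        have hA : whileA lines dp n j = whileA lines dp n (j + 1) := by
          rw [whileA]; rw [if_pos hjn, if_neg hP, if_pos hD]
        rw [hA, whileA_eq lines dp n (j + 1)]
        have hS : bStop lines dp n j = bStop lines dp n (j + 1) := by
          apply bStop_congr lines dp n j (j + 1) (by omega) (by omega)
          intro i hi1 hi2
          have : i = j := by omega
          subst this; exact Or.inr hD
        rw [← hS]
        refine (bTrim_lb_irrel lines j (j + 1) (bStop lines dp n j) (by omega)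
          (hS ▸ bStop_ge lines dp n (j + 1)) (Or.inr ?_)).symm
        simpa using hP
      · -- terminator line: both stop at j
        have hA : whileA lines dp n j = j := by
          rw [whileA]; rw [if_pos hjn, if_neg hP, if_neg hD]
        have hS : bStop lines dp n j = j := by
          rw [bStop]; rw [if_pos hjn, if_neg (by rintro (h | h); exacts [hP h, hD h])]
        have hT : bTrim lines j j = j := by
          rw [bTrim]; rw [if_neg (by omega)]
        rw [hA, hS, hT]
  · have hA : whileA lines dp n j = j := by rw [whileA]; rw [if_neg hjn]
    have hS : bStop lines dp n j = j := by rw [bStop]; rw [if_neg hjn]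
    have hT : bTrim lines j j = j := by rw [bTrim]; rw [if_neg (by omega)]
    rw [hA, hS, hT]
  termination_by (n - j).toNat
  decreasing_by
  · exact pvDecJump n j k hk1 h2.1
  · exact pvDecStep n j hjn

-- ===== VERDICT (by name: the statement is the Claim_ definition above) =====
theorem splice_existing_source_spec : Claim_equal_splice_existing_source := by
  intro text source_line source_col rendered_source _hdom _hpre
  unfold Spec_splice_existing_source splice_existing_source splice_existing_source_alt
  cases h : PySem.List.pyGet? (pySplitlinesKeep text.toList) source_line with
  | none => simp only [h]
  | some l0 => simp only [h, whileA_eq]
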